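-- pv_equiv track=rewrite | github.com/traqonya/Mini-Python-Recursion-Projects | Projects/6-Recursive Check for Any Empty List Function/Main.py | any_empty
-- ===== SOURCE A (Python) =====
-- def any_empty(my_list):
--     if my_list== []:
--         return True
--     for i in my_list:
--         if type(i)==list:
--             if any_empty(i):
--                 return True
--         else:
--             if i == []:
--                 return True
--     return False
-- ===== SOURCE B (Python) =====
-- def any_empty(my_list):
--     # Flat membership check: for lists of lists of ints, A's recursion amounts to
--     # "the list itself is empty or it contains an empty sublist".
--     return my_list == [] or [] in my_list
-- ===== Notes on version B (the rewrite author's own statement) =====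
-- stated objective: simpler
-- what changed: Replaced the explicit recursion over the structure by a single flat check 'my_list == [] or [] in my_list', which is what A computes on lists of lists of ints.
import Mathlib
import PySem

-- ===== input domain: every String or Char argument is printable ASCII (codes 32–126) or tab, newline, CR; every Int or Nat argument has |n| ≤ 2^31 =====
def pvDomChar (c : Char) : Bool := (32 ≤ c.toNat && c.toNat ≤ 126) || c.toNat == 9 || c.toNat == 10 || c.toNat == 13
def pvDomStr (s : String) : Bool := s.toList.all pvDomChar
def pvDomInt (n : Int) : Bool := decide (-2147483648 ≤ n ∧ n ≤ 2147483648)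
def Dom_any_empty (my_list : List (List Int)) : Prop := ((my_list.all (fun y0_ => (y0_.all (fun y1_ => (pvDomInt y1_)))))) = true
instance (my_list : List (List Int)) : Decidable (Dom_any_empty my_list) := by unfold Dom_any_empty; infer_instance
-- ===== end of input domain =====

-- B is a flat check equivalent to A's recursion on lists of lists of ints; objective: simpler.

-- ===== PORT A =====
-- inner recursive call any_empty(i) with i : List Int: 'if i == []: return True',
-- then the loop over ints never fires either branch's True (type(j)==list is False
-- and an int never equals []), so it returns i == [].
def any_empty_inner (i : List Int) : Bool :=
  if i = [] then true
  else i.any (fun _j => false)   -- loop body: both True branches unreachable for ints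

def any_empty (my_list : List (List Int)) : Bool :=
  if my_list = [] then true
  else my_list.any (fun i => any_empty_inner i)   -- type(i)==list holds, recurse

-- ===== PORT B =====
def any_empty_alt (my_list : List (List Int)) : Bool :=
  decide (my_list = []) || my_list.contains []

-- ===== PRECONDITION & SPEC =====
def Spec_any_empty (my_list : List (List Int)) (out : Bool) : Prop := out = any_empty_alt my_list
instance (my_list : List (List Int)) (out : Bool) : Decidable (Spec_any_empty my_list out) := by unfold Spec_any_empty; infer_instance

-- ===== CLAIM (what is proved, stated in full; the proofs are below) =====
def Claim_equal_any_empty : Prop := ∀ (my_list : List (List Int)), Dom_any_empty my_list → Spec_any_empty my_list (any_empty my_list)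

-- ===== LEMMAS AND PROOFS =====
theorem any_empty_inner_eq (i : List Int) : any_empty_inner i = decide (i = []) := by
  cases i <;> simp [any_empty_inner]

-- ===== VERDICT (by name: the statement is the Claim_ definition above) =====
theorem any_empty_spec : Claim_equal_any_empty := by
  intro my_list _
  unfold Spec_any_empty any_empty any_empty_alt
  cases my_list with
  | nil => simp
  | cons h t =>
    simp only [any_empty_inner_eq, List.contains_eq_any_beq]
    rw [if_neg (List.cons_ne_nil h t), show (decide ((h :: t) = []) : Bool) = false by simp,
      Bool.false_or]
    simp only [show ∀ x : List Int, (([] : List Int) == x) = decide (x = []) from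
      fun x => by cases x <;> rfl]
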